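-- pv_equiv track=rewrite | github.com/jordang100/CS5 | Week9/wk9lab/hw9pr1.py | diagonalize
-- ===== SOURCE A (Python) =====
-- def createBoard(width, height):
--     """
--     Returns a 2d array with "height" rows and "width" cols
--     """
--     A = []
--     for row in range(height):
--         A += [[0]*width]        # use the above fun. so that SOMETHING is one row!!
--     return A
--
-- def diagonalize(width, height):
--     """
--     Creates an empty board and then modifies it
--     so that it has a diagonal strip of "on" cells.
--     but, only in the * interior * of the 2d array
--     """
--     A = createBoard(width, height)
--
--     for row in range(1,height-1):
--         for col in range(1,width-1):
--             if row == col: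
--                 A[row][col] = 1
--             else:
--                 A[row][col] = 0
--
--     return A
-- ===== SOURCE B (Python) =====
-- def createBoard(width, height):
--     """
--     Returns a 2d array with "height" rows and "width" cols
--     """
--     A = []
--     for row in range(height):
--         A += [[0]*width]
--     return A
--
-- def diagonalize(width, height):
--     """
--     Builds each row directly: a cell is 1 exactly when it lies on the
--     diagonal strictly inside the interior, 0 everywhere else.
--     """
--     d = min(width, height) - 1
--     return [[1 if (r == c and 1 <= r and r < d) else 0 for c in range(width)]
--             for r in range(height)]
-- ===== Notes on version B (the rewrite author's own statement) =====
-- stated objective: simpler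
-- what changed: B builds each row directly with a comprehension (cell = 1 iff r == c and 1 <= r < min(width,height)-1), replacing A's create-then-mutate pass with its nested interior double loop that rewrites every interior cell.
import Mathlib
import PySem

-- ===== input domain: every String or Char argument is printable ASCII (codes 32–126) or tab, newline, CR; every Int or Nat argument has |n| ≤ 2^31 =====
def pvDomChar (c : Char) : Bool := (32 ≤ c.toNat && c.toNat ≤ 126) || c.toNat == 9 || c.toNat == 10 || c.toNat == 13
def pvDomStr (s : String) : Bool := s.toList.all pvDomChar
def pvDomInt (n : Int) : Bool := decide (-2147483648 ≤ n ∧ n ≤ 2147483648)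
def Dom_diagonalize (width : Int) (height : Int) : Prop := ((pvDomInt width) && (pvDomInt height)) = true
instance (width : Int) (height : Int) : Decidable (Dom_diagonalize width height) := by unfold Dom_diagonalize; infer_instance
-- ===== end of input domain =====

-- B builds each row directly by a comprehension instead of A's create-then-mutate
-- interior double loop; objective: simpler (same asymptotic cost).

-- ===== PORT A =====
-- createBoard: A = []; for row in range(height): A += [[0]*width]
-- ([0]*width is List.replicate width.toNat 0 — exact, Python's list repetition with a
--  nonpositive count gives [])
def createBoardA (width : Int) (height : Int) : List (List Int) :=
  (PySem.List.pyRange 0 height 1).foldl (fun A _row => A ++ [List.replicate width.toNat 0]) []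

-- for row in range(1,height-1): for col in range(1,width-1): if row==col: A[row][col]=1 else: A[row][col]=0
-- (row,col are ≥ 1 and in range here, so A[row][col]=v is List.modify/List.set — exact)
def diagonalize (width : Int) (height : Int) : List (List Int) :=
  (PySem.List.pyRange 1 (height - 1) 1).foldl (fun A row =>
    (PySem.List.pyRange 1 (width - 1) 1).foldl (fun A col =>
      if row = col then
        A.modify row.toNat (fun r => r.set col.toNat 1)
      else
        A.modify row.toNat (fun r => r.set col.toNat 0)) A) (createBoardA width height)

-- ===== PORT B =====
-- d = min(width, height) - 1
-- return [[1 if (r == c and 1 <= r and r < d) else 0 for c in range(width)] for r in range(height)]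
def diagonalize_alt (width : Int) (height : Int) : List (List Int) :=
  let d := min width height - 1
  (PySem.List.pyRange 0 height 1).map (fun r =>
    (PySem.List.pyRange 0 width 1).map (fun c =>
      if r = c ∧ 1 ≤ r ∧ r < d then 1 else 0))

-- ===== PRECONDITION & SPEC =====
def Spec_diagonalize (width : Int) (height : Int) (out : List (List Int)) : Prop := out = diagonalize_alt width height
instance (width : Int) (height : Int) (out : List (List Int)) : Decidable (Spec_diagonalize width height out) := by unfold Spec_diagonalize; infer_instance

-- ===== CLAIM (what is proved, stated in full; the proofs are below) =====
def Claim_equal_diagonalize : Prop := ∀ (width : Int) (height : Int), Dom_diagonalize width height → Spec_diagonalize width height (diagonalize width height)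

-- ===== LEMMAS AND PROOFS =====

-- the effect of A's inner loop on one row, as a single function on that row
def rowFun (width : Int) (row : Int) (x : List Int) : List Int :=
  (PySem.List.pyRange 1 (width - 1) 1).foldl
    (fun x c => x.modify c.toNat (fun _ => if row = c then 1 else 0)) x

theorem foldl_app_const {α : Type} (x : α) :
    ∀ (l : List Int) (acc : List α),
      l.foldl (fun A _ => A ++ [x]) acc = acc ++ List.replicate l.length x
  | [], acc => by simp
  | r :: l, acc => by
      simp [List.foldl_cons, foldl_app_const x l, List.replicate_succ, List.append_assoc]

theorem modify_modify_same {α : Type} (l : List α) (i : Nat) (g f : α → α) :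
    (l.modify i g).modify i f = l.modify i (fun x => f (g x)) := by
  apply List.ext_getElem?
  intro j
  simp only [List.getElem?_modify]
  cases l[j]? <;> by_cases h : i = j <;> simp [h]

theorem foldl_modify_fuse {α : Type} (i : Nat) (f : Int → α → α) :
    ∀ (cs : List Int) (A : List α) (g0 : α → α),
      cs.foldl (fun A c => A.modify i (f c)) (A.modify i g0)
        = A.modify i (fun x => cs.foldl (fun x c => f c x) (g0 x))
  | [], A, g0 => by simp
  | c :: cs, A, g0 => by
      simp only [List.foldl_cons, modify_modify_same]
      exact foldl_modify_fuse i f cs A (fun x => f c (g0 x))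

theorem foldl_modify_id {α : Type} (i : Nat) (f : Int → α → α) (cs : List Int) (A : List α) :
    cs.foldl (fun A c => A.modify i (f c)) A
      = A.modify i (fun x => cs.foldl (fun x c => f c x) x) := by
  have := foldl_modify_fuse i f cs A id
  simpa using this

theorem getElem?_foldl_modify {α : Type} (G : Int → α → α) :
    ∀ (rs : List Int) (A : List α) (j : Nat),
      (∀ r ∈ rs, 0 ≤ r) → ((rs.map Int.toNat).Nodup) →
      (rs.foldl (fun A r => A.modify r.toNat (G r)) A)[j]?
        = if (j : Int) ∈ rs then (A[j]?).map (G (j : Int)) else A[j]?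
  | [], A, j, _, _ => by simp
  | r :: rs, A, j, hnn, hnd => by
      have h0 : 0 ≤ r := hnn r (List.mem_cons_self ..)
      have hnn' : ∀ s ∈ rs, 0 ≤ s := fun s hs => hnn s (List.mem_cons_of_mem _ hs)
      simp only [List.map_cons, List.nodup_cons] at hnd
      rw [List.foldl_cons, getElem?_foldl_modify G rs _ j hnn' hnd.2]
      by_cases hjr : (j : Int) = r
      · subst hjr
        have hmem : ((j : Nat) : Int) ∉ rs := fun hj =>
          hnd.1 (List.mem_map.mpr ⟨_, hj, rfl⟩)
        rw [if_neg hmem, if_pos (List.mem_cons_self ..)]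
        simp
      · have hr : r.toNat ≠ j := by omega
        simp only [List.getElem?_modify]
        by_cases hm : (j : Int) ∈ rs
        · rw [if_pos hm, if_pos (List.mem_cons_of_mem _ hm)]
          cases A[j]? <;> simp [hr]
        · rw [if_neg hm, if_neg (by simp [List.mem_cons, hjr, hm])]
          cases A[j]? <;> simp [hr]

theorem createBoardA_eq (w h : Int) :
    createBoardA w h = List.replicate h.toNat (List.replicate w.toNat 0) := by
  unfold createBoardA
  rw [foldl_app_const]
  simp [PySem.List.length_pyRange_one]

theorem diag_modify_form (w h : Int) :
    diagonalize w h =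
      (PySem.List.pyRange 1 (h - 1) 1).foldl
        (fun A r => A.modify r.toNat (rowFun w r))
        (List.replicate h.toNat (List.replicate w.toNat 0)) := by
  unfold diagonalize
  rw [createBoardA_eq]
  congr 1
  funext A row
  have h1 : (fun (A : List (List Int)) (col : Int) =>
      if row = col then A.modify row.toNat (fun r => r.set col.toNat 1)
      else A.modify row.toNat (fun r => r.set col.toNat 0))
      = fun A col => A.modify row.toNat (fun r => r.modify col.toNat (fun _ => if row = col then 1 else 0)) := by
    funext A c
    by_cases hc : row = c <;> simp [hc, List.set_eq_modify]
  rw [h1, foldl_modify_id]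
  rfl

theorem diag_eq (w h : Int) : diagonalize w h = diagonalize_alt w h := by
  rw [diag_modify_form]
  unfold diagonalize_alt
  obtain ⟨m, hme, hmw, hmh, hmor⟩ : ∃ m, min w h = m ∧ m ≤ w ∧ m ≤ h ∧ (m = w ∨ m = h) :=
    ⟨min w h, rfl, min_le_left _ _, min_le_right _ _, min_choice _ _⟩
  simp only [hme]
  have hnnR : ∀ r ∈ PySem.List.pyRange 1 (h - 1) 1, 0 ≤ r := by
    intro r hr
    have := PySem.List.mem_pyRange_one.mp hr
    omega
  have hndR : ((PySem.List.pyRange 1 (h - 1) 1).map Int.toNat).Nodup := by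
    refine (PySem.List.nodup_pyRange_one _ _).map_on ?_
    intro x hx y hy hxy
    have hx' := PySem.List.mem_pyRange_one.mp hx
    have hy' := PySem.List.mem_pyRange_one.mp hy
    omega
  have hnnC : ∀ c ∈ PySem.List.pyRange 1 (w - 1) 1, 0 ≤ c := by
    intro c hc
    have := PySem.List.mem_pyRange_one.mp hc
    omega
  have hndC : ((PySem.List.pyRange 1 (w - 1) 1).map Int.toNat).Nodup := by
    refine (PySem.List.nodup_pyRange_one _ _).map_on ?_
    intro x hx y hy hxy
    have hx' := PySem.List.mem_pyRange_one.mp hx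
    have hy' := PySem.List.mem_pyRange_one.mp hy
    omega
  apply List.ext_getElem?
  intro j
  rw [getElem?_foldl_modify _ _ _ _ hnnR hndR, List.getElem?_map,
    PySem.List.getElem?_pyRange_one]
  by_cases hj : j < h.toNat
  · have hj' : j < (h - 0).toNat := by omega
    rw [if_pos hj']
    by_cases hmem : (j : Int) ∈ PySem.List.pyRange 1 (h - 1) 1
    · have hjb := PySem.List.mem_pyRange_one.mp hmem
      rw [if_pos hmem]
      rw [List.getElem?_replicate, if_pos hj]
      simp only [Option.map_some, zero_add]
      congr 1
      show rowFun w (j : Int) (List.replicate w.toNat 0) = _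
      unfold rowFun
      apply List.ext_getElem?
      intro k
      rw [getElem?_foldl_modify _ _ _ _ hnnC hndC, List.getElem?_map,
        PySem.List.getElem?_pyRange_one, List.getElem?_replicate]
      by_cases hk : k < w.toNat
      · have hk' : k < (w - 0).toNat := by omega
        rw [if_pos hk', if_pos hk]
        by_cases hkm : (k : Int) ∈ PySem.List.pyRange 1 (w - 1) 1
        · have hkb := PySem.List.mem_pyRange_one.mp hkm
          rw [if_pos hkm]
          have hval : (if (j : Int) = (k : Int) then (1 : Int) else 0)
              = (if ((j : Int) = (k : Int) ∧ 1 ≤ (j : Int) ∧ (j : Int) < m - 1) then 1 else 0) := by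
            by_cases hjk : (j : Int) = (k : Int)
            · rw [if_pos hjk, if_pos ⟨hjk, by omega, by omega⟩]
            · rw [if_neg hjk, if_neg (fun hc => hjk hc.1)]
          simp only [Option.map_some, zero_add, hval]
        · have hkb : ¬ (1 ≤ (k : Int) ∧ (k : Int) < w - 1) :=
            fun hh => hkm (PySem.List.mem_pyRange_one.mpr hh)
          rw [if_neg hkm]
          simp
          omega
      · have hk' : ¬ k < (w - 0).toNat := by omega
        have hkm : (k : Int) ∉ PySem.List.pyRange 1 (w - 1) 1 := by
          intro hh
          have := PySem.List.mem_pyRange_one.mp hh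
          omega
        simp [hk]
    · have hjb : ¬ (1 ≤ (j : Int) ∧ (j : Int) < h - 1) :=
        fun hh => hmem (PySem.List.mem_pyRange_one.mpr hh)
      rw [if_neg hmem]
      rw [List.getElem?_replicate, if_pos hj]
      simp only [Option.map_some, zero_add]
      congr 1
      apply List.ext_getElem?
      intro k
      rw [List.getElem?_map, PySem.List.getElem?_pyRange_one, List.getElem?_replicate]
      by_cases hk : k < w.toNat
      · have hk' : k < (w - 0).toNat := by omega
        rw [if_pos hk', if_pos hk]
        simp
        omega
      · have hk' : ¬ k < (w - 0).toNat := by omega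
        simp [hk]
  · have hj' : ¬ j < (h - 0).toNat := by omega
    have hmem : (j : Int) ∉ PySem.List.pyRange 1 (h - 1) 1 := by
      intro hh
      have := PySem.List.mem_pyRange_one.mp hh
      omega
    simp [hj, hmem]

-- ===== VERDICT (by name: the statement is the Claim_ definition above) =====
theorem diagonalize_spec : Claim_equal_diagonalize := by
  intro width height _
  unfold Spec_diagonalize
  exact diag_eq width height
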